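-- pv_equiv track=rewrite | github.com/domingogallardo/docflow | utils/sync_public_highlights.py | _find_match_index
-- ===== SOURCE A (Python) =====
-- from typing import Callable, Dict, Iterable, Tuple
--
-- def iter_match_indices(full_text: str, target: str) -> Iterable[int]:
--     start = 0
--     while True:
--         idx = full_text.find(target, start)
--         if idx == -1:
--             return
--         yield idx
--         start = idx + len(target)
--
-- def _context_matches(full_text: str, idx: int, target_len: int, prefix: str, suffix: str) -> bool:
--     if prefix:
--         window = full_text[max(0, idx - len(prefix) - 1) : idx]
--         if not (window.endswith(prefix) or window.rstrip().endswith(prefix)):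
--             return False
--     if suffix:
--         window = full_text[idx + target_len : idx + target_len + len(suffix) + 1]
--         if not (window.startswith(suffix) or window.lstrip().startswith(suffix)):
--             return False
--     return True
--
-- def _find_match_index(full_text: str, target: str, prefix: str, suffix: str) -> int:
--     if not target:
--         return -1
--     occurrences = list(iter_match_indices(full_text, target))
--     if not occurrences:
--         return -1
--     if len(occurrences) == 1 and not (prefix or suffix):
--         return occurrences[0]
--     if len(occurrences) == 1 and (prefix or suffix):
--         return occurrences[0]
--     if prefix or suffix:
--         for idx in occurrences:
--             if _context_matches(full_text, idx, len(target), prefix, suffix):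
--                 return idx
--     return occurrences[0]
-- ===== SOURCE B (Python) =====
-- def _context_ok(full_text, idx, tlen, prefix, suffix):
--     pre_win = full_text[max(0, idx - len(prefix) - 1):idx]
--     suf_win = full_text[idx + tlen:idx + tlen + len(suffix) + 1]
--     return ((not prefix or pre_win.endswith(prefix) or pre_win.rstrip().endswith(prefix))
--             and (not suffix or suf_win.startswith(suffix) or suf_win.lstrip().startswith(suffix)))
--
-- def _find_match_index(full_text: str, target: str, prefix: str, suffix: str) -> int:
--     if not target:
--         return -1
--     first = -1
--     start = 0
--     while True:
--         idx = full_text.find(target, start)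
--         if idx == -1:
--             return first
--         if first == -1:
--             first = idx
--         if _context_ok(full_text, idx, len(target), prefix, suffix):
--             return idx
--         start = idx + len(target)
-- ===== Notes on version B (the rewrite author's own statement) =====
-- stated objective: simpler
-- what changed: B replaces A's generator-materialized occurrence list plus a four-branch ladder (with a separate context scan) by one while-loop over find() that tracks the first occurrence and returns early on the first context match, with the context predicate written as a single boolean conjunction.
import Mathlib
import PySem

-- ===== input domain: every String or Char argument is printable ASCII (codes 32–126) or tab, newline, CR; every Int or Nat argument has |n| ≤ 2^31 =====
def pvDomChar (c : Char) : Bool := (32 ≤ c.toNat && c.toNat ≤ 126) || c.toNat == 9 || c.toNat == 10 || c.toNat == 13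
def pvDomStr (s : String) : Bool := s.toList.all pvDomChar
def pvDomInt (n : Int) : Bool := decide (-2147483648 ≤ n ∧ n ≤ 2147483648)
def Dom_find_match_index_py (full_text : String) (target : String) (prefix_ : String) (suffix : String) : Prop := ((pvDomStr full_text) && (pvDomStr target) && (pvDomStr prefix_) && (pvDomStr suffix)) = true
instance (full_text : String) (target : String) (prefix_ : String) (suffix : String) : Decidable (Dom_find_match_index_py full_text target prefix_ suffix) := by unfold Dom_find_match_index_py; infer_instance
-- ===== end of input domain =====

-- B folds A's list-materialize-then-branch-ladder into one find-loop with an early return; objective: simpler, same cost.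

-- ===== PORT A =====
-- iter_match_indices: fuel = full.length + 1 bounds the iterations (each step advances start by len(target) ≥ 1)
def fmiIter (full target : List Char) (fuel : Nat) (start : Nat) : List Nat :=
  match fuel with
  | 0 => []
  | f + 1 =>
    let idx := PySem.Chars.findFrom full target (start : Int) none
    if idx = -1 then []
    else idx.toNat :: fmiIter full target f (idx.toNat + target.length)

-- _context_matches, transliterated (early-return-false chain)
def fmiCtx (full : List Char) (idx tlen : Nat) (pre suf : List Char) : Bool :=
  let w1 := PySem.List.slice full (some (max 0 ((idx : Int) - (pre.length : Int) - 1))) (some (idx : Int))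
  let w2 := PySem.List.slice full (some ((idx : Int) + (tlen : Int))) (some ((idx : Int) + (tlen : Int) + (suf.length : Int) + 1))
  if pre.isEmpty = false && !(PySem.Chars.endswith w1 pre || PySem.Chars.endswith (PySem.Chars.rstrip w1) pre) then false
  else if suf.isEmpty = false && !(PySem.Chars.startswith w2 suf || PySem.Chars.startswith (PySem.Chars.lstrip w2) suf) then false
  else true

-- the 'for idx in occurrences: if _context_matches: return idx' loop
def fmiScan (full : List Char) (tlen : Nat) (pre suf : List Char) : List Nat → Option Nat
  | [] => none
  | i :: r => if fmiCtx full i tlen pre suf then some i else fmiScan full tlen pre suf r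

def find_match_index_py (full_text : String) (target : String) (prefix_ : String) (suffix : String) : Int :=
  let full := full_text.toList
  let t := target.toList
  let pre := prefix_.toList
  let suf := suffix.toList
  if t = [] then -1
  else
    let occs := fmiIter full t (full.length + 1) 0
    match occs with
    | [] => -1
    | o :: rest =>
      if (o :: rest).length = 1 ∧ ¬(pre ≠ [] ∨ suf ≠ []) then (o : Int)
      else if (o :: rest).length = 1 ∧ (pre ≠ [] ∨ suf ≠ []) then (o : Int)
      else if pre ≠ [] ∨ suf ≠ [] then
        match fmiScan full t.length pre suf (o :: rest) with
        | some i => (i : Int)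
        | none => (o : Int)
      else (o : Int)

-- ===== PORT B =====
-- _context_ok: one boolean conjunction, no early returns
def fmiCtxB (full : List Char) (idx tlen : Nat) (pre suf : List Char) : Bool :=
  let preWin := PySem.List.slice full (some (max 0 ((idx : Int) - (pre.length : Int) - 1))) (some (idx : Int))
  let sufWin := PySem.List.slice full (some ((idx : Int) + (tlen : Int))) (some ((idx : Int) + (tlen : Int) + (suf.length : Int) + 1))
  (pre.isEmpty || PySem.Chars.endswith preWin pre || PySem.Chars.endswith (PySem.Chars.rstrip preWin) pre)
    && (suf.isEmpty || PySem.Chars.startswith sufWin suf || PySem.Chars.startswith (PySem.Chars.lstrip sufWin) suf)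

-- the single while-loop: first = index of first occurrence (-1 = none yet), early return on a context match
def fmiLoop (full target pre suf : List Char) (fuel : Nat) (start : Nat) (first : Int) : Int :=
  match fuel with
  | 0 => first
  | f + 1 =>
    let idx := PySem.Chars.findFrom full target (start : Int) none
    if idx = -1 then first
    else
      let i := idx.toNat
      let first' := if first = -1 then (i : Int) else first
      if fmiCtxB full i target.length pre suf then (i : Int)
      else fmiLoop full target pre suf f (i + target.length) first'

def find_match_index_py_alt (full_text : String) (target : String) (prefix_ : String) (suffix : String) : Int :=
  let full := full_text.toList
  let t := target.toList
  if t = [] then -1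
  else fmiLoop full t prefix_.toList suffix.toList (full.length + 1) 0 (-1)

-- ===== PRECONDITION & SPEC =====
def Spec_find_match_index_py (full_text : String) (target : String) (prefix_ : String) (suffix : String) (out : Int) : Prop := out = find_match_index_py_alt full_text target prefix_ suffix
instance (full_text : String) (target : String) (prefix_ : String) (suffix : String) (out : Int) : Decidable (Spec_find_match_index_py full_text target prefix_ suffix out) := by unfold Spec_find_match_index_py; infer_instance

-- ===== CLAIM (what is proved, stated in full; the proofs are below) =====
def Claim_equal_find_match_index_py : Prop := ∀ (full_text : String) (target : String) (prefix_ : String) (suffix : String), Dom_find_match_index_py full_text target prefix_ suffix → Spec_find_match_index_py full_text target prefix_ suffix (find_match_index_py full_text target prefix_ suffix)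

-- ===== LEMMAS AND PROOFS =====
lemma fmiCtx_eq (full : List Char) (i tlen : Nat) (pre suf : List Char) :
    fmiCtxB full i tlen pre suf = fmiCtx full i tlen pre suf := by
  unfold fmiCtx fmiCtxB
  cases pre.isEmpty <;> cases suf.isEmpty <;>
    cases (PySem.Chars.endswith (PySem.List.slice full (some (max 0 ((i : Int) - (pre.length : Int) - 1))) (some (i : Int))) pre ||
      PySem.Chars.endswith (PySem.Chars.rstrip (PySem.List.slice full (some (max 0 ((i : Int) - (pre.length : Int) - 1))) (some (i : Int)))) pre) <;>
    cases (PySem.Chars.startswith (PySem.List.slice full (some ((i : Int) + (tlen : Int))) (some ((i : Int) + (tlen : Int) + (suf.length : Int) + 1))) suf ||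
      PySem.Chars.startswith (PySem.Chars.lstrip (PySem.List.slice full (some ((i : Int) + (tlen : Int))) (some ((i : Int) + (tlen : Int) + (suf.length : Int) + 1)))) suf) <;>
    simp_all

lemma fmiCtx_trivial (full : List Char) (i tlen : Nat) :
    fmiCtx full i tlen [] [] = true := by
  unfold fmiCtx; simp

lemma fmiLoop_eq (full target pre suf : List Char) (fuel : Nat) :
    ∀ start first,
      fmiLoop full target pre suf fuel start first =
        match fmiScan full target.length pre suf (fmiIter full target fuel start) with
        | some i => (i : Int)
        | none =>
          if first = -1 then
            (match fmiIter full target fuel start with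
             | [] => (-1 : Int)
             | o :: _ => (o : Int))
          else first := by
  induction fuel with
  | zero => intro start first; simp [fmiLoop, fmiIter, fmiScan]
  | succ f ih =>
    intro start first
    rw [fmiLoop, fmiIter]
    by_cases h : PySem.Chars.findFrom full target (start : Int) none = -1
    · simp [h, fmiScan]
    · simp only [if_neg h]
      rw [fmiCtx_eq]
      by_cases hc : fmiCtx full (PySem.Chars.findFrom full target (start : Int) none).toNat target.length pre suf = true
      · simp [hc, fmiScan]
      · rw [if_neg hc, ih]
        simp only [fmiScan, if_neg hc]
        cases hscan : fmiScan full target.length pre suf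
            (fmiIter full target f ((PySem.Chars.findFrom full target (start : Int) none).toNat + target.length)) with
        | some i => simp
        | none =>
          simp only []
          by_cases hf : first = -1
          · have hge : (0 : Int) ≤ ((PySem.Chars.findFrom full target (start : Int) none).toNat : Int) :=
              Int.natCast_nonneg _
            simp [hf]
            omega
          · simp [hf]

-- ===== VERDICT (by name: the statement is the Claim_ definition above) =====
theorem find_match_index_py_spec : Claim_equal_find_match_index_py := by
  intro full_text target prefix_ suffix _
  unfold Spec_find_match_index_py find_match_index_py find_match_index_py_alt
  by_cases ht : target.toList = []
  · simp [ht]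
  · simp only [ht, if_false]
    rw [fmiLoop_eq]
    cases hocc : fmiIter full_text.toList target.toList (full_text.toList.length + 1) 0 with
    | nil => simp [fmiScan]
    | cons o rest =>
      by_cases hps : prefix_ = "" ∧ suffix = ""
      · obtain ⟨hp, hs⟩ := hps
        subst hp; subst hs
        cases rest with
        | nil => simp [fmiScan, fmiCtx_trivial]
        | cons o2 r2 => simp [fmiScan, fmiCtx_trivial]
      · have hor := not_and_or.mp hps
        cases rest with
        | nil =>
          cases hc : fmiCtx full_text.toList o target.length prefix_.toList suffix.toList with
          | true => simp [fmiScan, hc, hor]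
          | false => simp [fmiScan, hc, hor]
        | cons o2 r2 =>
          cases hscan : fmiScan full_text.toList target.length prefix_.toList suffix.toList (o :: o2 :: r2) with
          | some i => simp [hscan, hor]
          | none => simp [hscan, hor]
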